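-- pv_equiv track=rewrite | github.com/lyuzicheng/Re-2Math | code/construction/mine_dataset.py | collapse_whitespace_with_mapping
-- ===== SOURCE A (Python) =====
-- from typing import Any, List, Dict, Optional, Tuple
--
-- def collapse_whitespace_with_mapping(text: str) -> Tuple[str, List[int]]:
--     chars: List[str] = []
--     positions: List[int] = []
--     last_was_space = True
--     for idx, ch in enumerate(str(text or "")):
--         if ch.isspace():
--             if not last_was_space:
--                 chars.append(" ")
--                 positions.append(idx)
--             last_was_space = True
--             continue
--         chars.append(ch)
--         positions.append(idx)
--         last_was_space = False
--
--     while chars and chars[-1] == " ":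
--         chars.pop()
--         positions.pop()
--     return "".join(chars), positions
-- ===== SOURCE B (Python) =====
-- from itertools import groupby
-- from typing import List, Tuple
--
-- def collapse_whitespace_with_mapping(text: str) -> Tuple[str, List[int]]:
--     pairs: List[Tuple[int, str]] = []
--     first = True
--     for is_space, group in groupby(enumerate(str(text or "")), key=lambda p: p[1].isspace()):
--         if is_space:
--             if not first:
--                 idx, _ = next(group)
--                 pairs.append((idx, " "))
--         else:
--             pairs.extend(group)
--         first = False
--     while pairs and pairs[-1][1] == " ":
--         pairs.pop()
--     return "".join(ch for _, ch in pairs), [i for i, _ in pairs]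
-- ===== Notes on version B (the rewrite author's own statement) =====
-- stated objective: alternative
-- what changed: Replaces A's per-character loop with a last_was_space flag by an itertools.groupby run-grouping traversal over enumerate(text): each whitespace run contributes one collapsed space at its first index (unless leading), each non-space run is extended wholesale, then trailing-space pairs are popped.
import Mathlib
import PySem

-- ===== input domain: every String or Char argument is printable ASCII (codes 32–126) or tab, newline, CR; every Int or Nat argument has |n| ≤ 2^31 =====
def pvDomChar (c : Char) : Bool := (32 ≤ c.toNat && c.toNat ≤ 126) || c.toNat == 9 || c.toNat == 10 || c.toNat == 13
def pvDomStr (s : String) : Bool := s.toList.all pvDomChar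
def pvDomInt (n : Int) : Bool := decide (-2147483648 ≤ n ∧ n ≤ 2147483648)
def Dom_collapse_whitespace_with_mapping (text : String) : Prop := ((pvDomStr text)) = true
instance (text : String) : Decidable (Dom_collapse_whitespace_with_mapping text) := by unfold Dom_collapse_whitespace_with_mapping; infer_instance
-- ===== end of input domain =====

-- B replaces A's per-character last_was_space state machine by a run-grouping traversal
-- (itertools.groupby over enumerate); same exact output, objective: alternative decomposition.
-- Note: `str(text or "")` is the identity on a str argument, so the ports take text.toList directly.

-- ===== PORT A =====
-- the per-character loop of A: state = (chars, positions, last_was_space); building by cons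
-- in the structural recursion yields exactly the left-to-right appended lists
def pvLoopA : List Char → Int → Bool → List Char × List Int
  | [], _, _ => ([], [])
  | c :: rest, idx, lws =>
    if PySem.Chars.isspace c then
      if lws then pvLoopA rest (idx + 1) true
      else
        let r := pvLoopA rest (idx + 1) true
        (' ' :: r.1, idx :: r.2)
    else
      let r := pvLoopA rest (idx + 1) false
      (c :: r.1, idx :: r.2)

-- A's trailing-pop while-loop, exact via reversal: it pops the LAST element while it is ' ',
-- which on the reversed lists is dropping from the front
def pvTrimA : List Char → List Int → List Char × List Int
  | c :: cs, p :: ps => if c = ' ' then pvTrimA cs ps else (c :: cs, p :: ps)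
  | cs, ps => (cs, ps)

def collapse_whitespace_with_mapping (text : String) : String × List Int :=
  let r := pvLoopA text.toList 0 true
  let t := pvTrimA r.1.reverse r.2.reverse
  (String.ofList t.1.reverse, t.2.reverse)

-- ===== PORT B =====
-- enumerate(group) for a non-space run
def pvEnumFrom (idx : Int) : List Char → List (Int × Char)
  | [] => []
  | c :: cs => (idx, c) :: pvEnumFrom (idx + 1) cs

-- groupby over enumerate: each step consumes a WHOLE run of equal isspace-key;
-- `first` suppresses a leading whitespace group
def pvRunsB (first : Bool) (idx : Int) (l : List Char) : List (Int × Char) :=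
  match l with
  | [] => []
  | c :: rest =>
    if PySem.Chars.isspace c then
      let ws := rest.takeWhile PySem.Chars.isspace
      (if first then [] else [(idx, ' ')]) ++
        pvRunsB false (idx + 1 + (ws.length : Int)) (rest.dropWhile PySem.Chars.isspace)
    else
      let run := rest.takeWhile (fun d => !PySem.Chars.isspace d)
      pvEnumFrom idx (c :: run) ++
        pvRunsB false (idx + 1 + (run.length : Int)) (rest.dropWhile (fun d => !PySem.Chars.isspace d))
  termination_by l.length
  decreasing_by
  · exact Nat.lt_succ_of_le (List.length_dropWhile_le _ _)
  · exact Nat.lt_succ_of_le (List.length_dropWhile_le _ _)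

def collapse_whitespace_with_mapping_alt (text : String) : String × List Int :=
  let pairs := pvRunsB true 0 text.toList
  -- the trailing-space pop loop, exact via reversal
  let trimmed := (pairs.reverse.dropWhile (fun p => p.2 == ' ')).reverse
  (String.ofList (trimmed.map (·.2)), trimmed.map (·.1))

-- ===== PRECONDITION & SPEC =====
def Spec_collapse_whitespace_with_mapping (text : String) (out : String × List Int) : Prop := out = collapse_whitespace_with_mapping_alt text
instance (text : String) (out : String × List Int) : Decidable (Spec_collapse_whitespace_with_mapping text out) := by unfold Spec_collapse_whitespace_with_mapping; infer_instance

-- ===== CLAIM (what is proved, stated in full; the proofs are below) =====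
def Claim_equal_collapse_whitespace_with_mapping : Prop := ∀ (text : String), Dom_collapse_whitespace_with_mapping text → Spec_collapse_whitespace_with_mapping text (collapse_whitespace_with_mapping text)

-- ===== LEMMAS AND PROOFS =====

-- skipping a whole whitespace run = entering with flag true
theorem pvRunsB_true_skip (idx : Int) (l : List Char) :
    pvRunsB true idx l
      = pvRunsB false (idx + ((l.takeWhile PySem.Chars.isspace).length : Int))
          (l.dropWhile PySem.Chars.isspace) := by
  cases l with
  | nil => simp [pvRunsB]
  | cons c rest =>
    by_cases h : PySem.Chars.isspace c
    · conv_lhs => rw [pvRunsB]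
      simp only [h, if_true, List.nil_append, List.takeWhile_cons, List.dropWhile_cons,
        List.length_cons]
      congr 1
      push_cast; ring
    · have h' : PySem.Chars.isspace c = false := by simpa using h
      simp only [List.takeWhile_cons, List.dropWhile_cons, h', Bool.false_eq_true, if_false,
        List.length_nil, Nat.cast_zero, add_zero]
      conv_lhs => rw [pvRunsB]
      conv_rhs => rw [pvRunsB]
      simp [h']

-- one whitespace step with flag true
theorem pvRunsB_true_space (idx : Int) (c : Char) (rest : List Char)
    (h : PySem.Chars.isspace c = true) :
    pvRunsB true idx (c :: rest) = pvRunsB true (idx + 1) rest := by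
  conv_lhs => rw [pvRunsB]
  rw [pvRunsB_true_skip (idx + 1) rest]
  simp [h]

-- one whitespace step with flag false emits a single collapsed space
theorem pvRunsB_false_space (idx : Int) (c : Char) (rest : List Char)
    (h : PySem.Chars.isspace c = true) :
    pvRunsB false idx (c :: rest) = (idx, ' ') :: pvRunsB true (idx + 1) rest := by
  conv_lhs => rw [pvRunsB]
  rw [pvRunsB_true_skip (idx + 1) rest]
  simp [h]

-- a non-space head is emitted and the flag becomes irrelevant
theorem pvRunsB_nonspace (b : Bool) (idx : Int) (c : Char) (rest : List Char)
    (h : PySem.Chars.isspace c = false) :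
    pvRunsB b idx (c :: rest) = (idx, c) :: pvRunsB false (idx + 1) rest := by
  conv_lhs => rw [pvRunsB]
  simp only [h, Bool.false_eq_true, if_false]
  cases rest with
  | nil => simp [pvRunsB, pvEnumFrom]
  | cons d rest2 =>
    by_cases hd : PySem.Chars.isspace d
    · simp [pvEnumFrom, hd, List.takeWhile_cons, List.dropWhile_cons]
    · have hd' : PySem.Chars.isspace d = false := by simpa using hd
      conv_rhs => rw [pvRunsB]
      simp only [hd', Bool.false_eq_true, if_false, List.takeWhile_cons, List.dropWhile_cons,
        Bool.not_false, if_true, pvEnumFrom, List.cons_append, List.length_cons]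
      push_cast
      ring_nf

-- A's loop computes exactly the unzipped run list of B
theorem pvLoopA_eq (l : List Char) : ∀ (idx : Int) (lws : Bool),
    pvLoopA l idx lws
      = ((pvRunsB lws idx l).map (·.2), (pvRunsB lws idx l).map (·.1)) := by
  induction l with
  | nil => intro idx lws; simp [pvLoopA, pvRunsB]
  | cons c rest ih =>
    intro idx lws
    by_cases h : PySem.Chars.isspace c
    · cases lws with
      | true =>
        rw [pvRunsB_true_space idx c rest h]
        simpa [pvLoopA, h] using ih (idx + 1) true
      | false =>
        rw [pvRunsB_false_space idx c rest h]
        simp only [pvLoopA, h, if_true, Bool.false_eq_true, if_false, List.map_cons]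
        rw [ih (idx + 1) true]
    · rw [pvRunsB_nonspace lws idx c rest (by simpa using h)]
      simp only [pvLoopA, h, Bool.false_eq_true, if_false, List.map_cons]
      rw [ih (idx + 1) false]

-- A's trailing pop loop on the unzipped reversed lists = dropWhile on the reversed pair list
theorem pvTrimA_eq (R : List (Int × Char)) :
    pvTrimA (R.map (·.2)) (R.map (·.1))
      = ((R.dropWhile (fun p => p.2 == ' ')).map (·.2),
         (R.dropWhile (fun p => p.2 == ' ')).map (·.1)) := by
  induction R with
  | nil => simp [pvTrimA]
  | cons x R ih =>
    by_cases h : x.2 = ' '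
    · simpa [pvTrimA, h] using ih
    · simp [pvTrimA, h]

-- ===== VERDICT (by name: the statement is the Claim_ definition above) =====
theorem collapse_whitespace_with_mapping_spec : Claim_equal_collapse_whitespace_with_mapping := by
  intro text _
  show _ = _
  unfold collapse_whitespace_with_mapping collapse_whitespace_with_mapping_alt
  rw [pvLoopA_eq]
  simp only [← List.map_reverse]
  rw [pvTrimA_eq]
  simp [List.map_reverse]
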